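-- pv_equiv track=rewrite | github.com/MasoumehVahedi/PythonMath | Math tests/numberOfLengthNand ValueLessThanK.py | solution
-- ===== SOURCE A (Python) =====
-- MAX = 10
--
-- def numToVec(N):
--     """ Function to convert a number into vector """
--     digit = []
--
--     # Push all the digits of N from the end
--     while N != 0:
--         digit.append(N % 10)
--         N = N // 10
--
--     if len(digit) == 0:
--         digit.append(0)
--
--     # Reverse the vector elements
--     digit = digit[::-1]
--
--     return digit
--
-- def solution(A, B, C):
--     """ Function to return the count of B length integers
--         which are less than C and they contain digits from set A[] only.
--     """
--     digit = numToVec(C)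
--     length = len(A)    # total number of available digits
--
--     # Case 1: Impossible cases, greater than C
--     if B > len(digit) or length == 0:
--         return 0
--
--     # Case 2: All integers of length B are valid as they all are less than C
--     elif B < len(digit):
--         # If 0 is available and B > 1, we can't start with 0. Example: 00, 01, 02, â† INVALID (start with 0)
--         if 0 in A and B != 1:
--             # (d - 1) = choices for first position (can't use 0)
--             # length ** (B - 1) = choices for remaining positions (can use any digit)
--             return (length - 1) * (length ** (B - 1))
--         else:
--             # Example: A = [0, 1, 2], B = 2 ----> length^B = 3^2 = 9 combinations
--             return length ** B
--
--     # Case 3: B == length of C (need dynamic programming)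
--     else:
--         dp = [0] * (B + 1)    # or [0 for i in range(B + 1)]
--         lower = [0] * (MAX + 1)
--
--         # Create lookup table: lower[i] = count of digits in A that are < i
--         for digit_val in A:
--             lower[digit_val + 1] = 1
--         # Convert to cumulative sum
--         for i in range(1, MAX + 1):
--             lower[i] = lower[i - 1] + lower[i]
--
--         flag = True  # Whether we're still bounded by C's digits
--         dp[0] = 0
--
--         for i in range(1, B + 1):
--             d = lower[digit[i - 1]]   # Count of available digits < current digit of C
--             dp[i] = dp[i-1] * length
--
--             # For first position, can't use 0 if B > 1
--             if i == 1 and 0 in A and B != 1: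
--                 d = d - 1
--
--             # If still bounded by C, add choices for current position
--             if flag:
--                 dp[i] += d
--
--             # Check if current digit of C is available in A
--             # If not, we're no longer bounded by C for subsequent positions
--             flag = flag and (lower[digit[i-1] + 1] == lower[digit[i-1]] + 1)
--
--     return dp[B]
-- ===== SOURCE B (Python) =====
-- def solution(A, B, C):
--     """Count B-digit integers < C using only digits from A (duplicates in A
--     count as separate choices, as in the original)."""
--     digits = []
--     n = C
--     while n != 0:
--         digits.append(n % 10)
--         n //= 10
--     if not digits:
--         digits = [0]
--     digits.reverse()
--
--     length = len(A)
--     if B > len(digits) or length == 0: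
--         return 0
--
--     avail = set(A)
--     lead = 1 if (0 in avail and B != 1) else 0
--     if B < len(digits):
--         return (length - lead) * length ** (B - 1) if lead else length ** B
--
--     def count(pos):
--         """Contribution of numbers agreeing with C on digits[:pos]."""
--         if pos == B:
--             return 0
--         below = sum(1 for x in avail if x < digits[pos])
--         if pos == 0:
--             below -= lead
--         rest = count(pos + 1) if digits[pos] in avail else 0
--         return below * length ** (B - 1 - pos) + rest
--
--     return count(0)
-- ===== Notes on version B (the rewrite author's own statement) =====
-- stated objective: simpler
-- what changed: Replaced the dp-array/lower-cumulative-table loop of the tight case by a recursive descent over C's digit positions that counts available digit values below each digit of C directly on set(A), stopping as soon as a digit of C is unavailable; cases 1 and 2 keep their closed forms with a shared leading-zero penalty.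
-- outside the precondition, e.g. on solution([-2], 1, 5): A returns 0, B returns 1; on solution([0], 0, 5): A returns 0.0, B returns 0.0; on solution([1], -1, 5): A returns 1.0, B returns 1.0
import Mathlib
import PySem

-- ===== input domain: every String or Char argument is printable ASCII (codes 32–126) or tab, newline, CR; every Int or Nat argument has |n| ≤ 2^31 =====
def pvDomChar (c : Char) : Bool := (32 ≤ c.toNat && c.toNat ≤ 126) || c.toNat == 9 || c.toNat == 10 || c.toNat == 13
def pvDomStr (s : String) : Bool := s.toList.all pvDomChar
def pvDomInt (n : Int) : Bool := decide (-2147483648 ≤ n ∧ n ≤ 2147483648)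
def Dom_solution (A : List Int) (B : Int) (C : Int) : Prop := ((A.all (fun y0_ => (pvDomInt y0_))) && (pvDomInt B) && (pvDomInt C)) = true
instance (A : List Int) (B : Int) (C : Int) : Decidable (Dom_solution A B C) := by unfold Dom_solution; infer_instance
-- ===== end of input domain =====

-- B replaces A's dp-array/lower-table loop by a recursion over C's digit positions that
-- counts available digit values below each digit of C directly on set(A); objective: simpler
-- (no speed claim; return value only).

-- ===== PORT A =====
-- while N != 0: digit.append(N % 10); N = N // 10   (Python loops forever for N < 0;
-- that case is outside Pre_solution, the port just stops there)
def numToVecLoop (N : Int) (digit : List Int) : List Int :=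
  if N = 0 then digit
  else if N < 0 then digit
  else numToVecLoop (PySem.Int.floordiv N 10) (digit ++ [PySem.Int.mod N 10])
termination_by N.natAbs
decreasing_by
  rename_i h1 h2
  rw [PySem.Int.floordiv_eq_ediv_of_pos (by omega)]
  omega

def numToVec (N : Int) : List Int :=
  let digit := numToVecLoop N []
  let digit := if digit.length = 0 then digit ++ [0] else digit
  digit.reverse  -- digit[::-1] is List.reverse (PySem.List.slice?_none_none_neg_one)

def solution (A : List Int) (B : Int) (C : Int) : Int :=
  let digit := numToVec C
  let length : Int := (A.length : Int)
  if B > (digit.length : Int) || length == 0 then 0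
  else if B < (digit.length : Int) then
    if A.contains 0 && B != 1 then (length - 1) * length ^ (B - 1).toNat
    else length ^ B.toNat
  else
    -- lower[digit_val + 1] = 1 for digit_val in A
    let lower := A.foldl (fun lw a => PySem.List.pySetD lw (a + 1) 1) (List.replicate 11 (0 : Int))
    -- for i in range(1, MAX + 1): lower[i] = lower[i - 1] + lower[i]
    let lower := (PySem.List.pyRange 1 11 1).foldl
      (fun lw i => PySem.List.pySetD lw i (PySem.List.pyGetD lw (i - 1) 0 + PySem.List.pyGetD lw i 0)) lower
    let dp := List.replicate (B + 1).toNat (0 : Int)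
    let dp := PySem.List.pySetD dp 0 0   -- dp[0] = 0
    let st := (PySem.List.pyRange 1 (B + 1) 1).foldl
      (fun (st : List Int × Bool) i =>
        let dp := st.1
        let flag := st.2
        let d := PySem.List.pyGetD lower (PySem.List.pyGetD digit (i - 1) 0) 0
        let dp := PySem.List.pySetD dp i (PySem.List.pyGetD dp (i - 1) 0 * length)
        let d := if i == 1 && A.contains 0 && B != 1 then d - 1 else d
        let dp := if flag then PySem.List.pySetD dp i (PySem.List.pyGetD dp i 0 + d) else dp
        let flag := flag &&
          (PySem.List.pyGetD lower (PySem.List.pyGetD digit (i - 1) 0 + 1) 0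
            == PySem.List.pyGetD lower (PySem.List.pyGetD digit (i - 1) 0) 0 + 1)
        (dp, flag))
      (dp, true)
    PySem.List.pyGetD st.1 B 0

-- ===== PORT B =====
-- same while loop as Source B's digit decomposition
def altDigitsLoop (n : Int) (digits : List Int) : List Int :=
  if n = 0 then digits
  else if n < 0 then digits
  else altDigitsLoop (PySem.Int.floordiv n 10) (digits ++ [PySem.Int.mod n 10])
termination_by n.natAbs
decreasing_by
  rename_i h1 h2
  rw [PySem.Int.floordiv_eq_ediv_of_pos (by omega)]
  omega

def altDigits (C : Int) : List Int :=
  let digits := altDigitsLoop C []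
  let digits := if digits = [] then [0] else digits
  digits.reverse

-- sum(1 for x in avail if x < digits[pos])
def altBelow (avail : List Int) (c : Int) : Int :=
  ((avail.filter (fun x => decide (x < c))).length : Int)

def altCount (digits : List Int) (avail : List Int) (length lead : Int) (Bn : Nat) (pos : Nat) : Int :=
  if Bn ≤ pos then 0   -- Source B tests pos == B; '≤' makes the recursion total, pos > Bn is never reached
  else
    let below := altBelow avail (digits.getD pos 0)   -- digits[pos], pos in range
    let below := if pos = 0 then below - lead else below
    let rest := if PySem.Set.contains avail (digits.getD pos 0)
                then altCount digits avail length lead Bn (pos + 1) else 0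
    below * length ^ (Bn - 1 - pos) + rest
termination_by Bn - pos
decreasing_by omega

def solution_alt (A : List Int) (B : Int) (C : Int) : Int :=
  let digits := altDigits C
  let length : Int := (A.length : Int)
  if B > (digits.length : Int) || length == 0 then 0
  else
    let avail := PySem.Set.ofList A
    let lead : Int := if PySem.Set.contains avail 0 && B != 1 then 1 else 0
    if B < (digits.length : Int) then
      -- (length - lead) * length ** (B - 1) if lead else length ** B
      (if lead ≠ 0 then (length - lead) * length ^ (B - 1).toNat else length ^ B.toNat)
    else altCount digits avail length lead B.toNat 0

-- ===== PRECONDITION & SPEC =====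
-- Pre_ excludes: C < 0 (A's while loop never terminates), negative B and B = 0 with 0 in A
-- (Python '**' with a negative exponent yields a float, not an int), and lists with an element
-- outside -1..9 when B equals the digit count of C (only then is the lower[] table built: there
-- A raises IndexError for elements outside -11..9, and for elements -11..-2 returns accidental
-- values produced by Python's negative-index wraparound in lower[]).
def Pre_solution (A : List Int) (B : Int) (C : Int) : Prop :=
  (1 ≤ B ∨ (B = 0 ∧ (0 : Int) ∉ A)) ∧ 0 ≤ C ∧
    ((∀ a ∈ A, -1 ≤ a ∧ a ≤ 9) ∨
      ¬((C = 0 ∧ B = 1) ∨ (0 < C ∧ 1 ≤ B ∧ 10 ^ (B - 1).toNat ≤ C ∧ C < 10 ^ B.toNat)))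
instance (A : List Int) (B : Int) (C : Int) : Decidable (Pre_solution A B C) := by
  unfold Pre_solution; infer_instance

def pvWitness_solution : List Int × Int × Int := ([0, 2, 5], 2, 31)

def Spec_solution (A : List Int) (B : Int) (C : Int) (out : Int) : Prop := out = solution_alt A B C
instance (A : List Int) (B : Int) (C : Int) (out : Int) : Decidable (Spec_solution A B C out) := by unfold Spec_solution; infer_instance

-- ===== CLAIM (what is proved, stated in full; the proofs are below) =====
def Claim_equal_solution : Prop := ∀ (A : List Int) (B : Int) (C : Int), Dom_solution A B C → Pre_solution A B C → Spec_solution A B C (solution A B C)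

-- ===== LEMMAS AND PROOFS =====

theorem altDigitsLoop_eq (n : Int) (acc : List Int) : altDigitsLoop n acc = numToVecLoop n acc := by
  fun_induction altDigitsLoop n acc <;> rw [numToVecLoop.eq_def] <;> split_ifs <;>
    first | rfl | assumption | omega

theorem altDigits_eq (C : Int) : altDigits C = numToVec C := by
  unfold altDigits numToVec
  rw [altDigitsLoop_eq]
  rcases h : numToVecLoop C [] with _ | ⟨x, xs⟩ <;> simp


-- ---- digit bounds ----
theorem mod10_bounds (a : Int) : 0 ≤ PySem.Int.mod a 10 ∧ PySem.Int.mod a 10 < 10 := by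
  rw [PySem.Int.mod_eq_emod_of_pos (by omega)]; omega

theorem numToVecLoop_mem (N : Int) (acc : List Int) :
    ∀ d ∈ numToVecLoop N acc, d ∈ acc ∨ (0 ≤ d ∧ d < 10) := by
  fun_induction numToVecLoop N acc with
  | case1 => intro d hd; exact Or.inl hd
  | case2 => intro d hd; exact Or.inl hd
  | case3 n acc h1 h2 ih =>
    intro d hd
    rcases ih d hd with h | h
    · rcases List.mem_append.1 h with h | h
      · exact Or.inl h
      · simp only [List.mem_singleton] at h; subst h; exact Or.inr (mod10_bounds n)
    · exact Or.inr h

theorem numToVec_mem (C : Int) : ∀ d ∈ numToVec C, 0 ≤ d ∧ d < 10 := by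
  intro d hd
  unfold numToVec at hd
  simp only [List.mem_reverse] at hd
  split at hd
  · rcases List.mem_append.1 hd with h | h
    · rcases numToVecLoop_mem C [] d h with h | h
      · simp at h
      · exact h
    · simp only [List.mem_singleton] at h; subst h; omega
  · rcases numToVecLoop_mem C [] d hd with h | h
    · simp at h
    · exact h

theorem numToVec_ne_nil (C : Int) : numToVec C ≠ [] := by
  by_cases h : (numToVecLoop C []).length = 0 <;>
    simp [numToVec, h, List.eq_nil_iff_length_eq_zero]

-- ---- the distinct-digits-below counter ----
def pvCnt (A : List Int) (i : Nat) : Int :=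
  (((List.range (i + 1)).filter (fun j : Nat => decide (((j : Int) - 1) ∈ A))).length : Int)

theorem pvCnt_succ (A : List Int) (m : Nat) :
    pvCnt A (m + 1) = pvCnt A m + (if (m : Int) ∈ A then 1 else 0) := by
  unfold pvCnt
  rw [List.range_succ, List.filter_append]
  split_ifs with h
  · simp [h]
  · simp [h]

-- ---- the lower[] table of port A ----
def pvLower1 (A : List Int) : List Int :=
  A.foldl (fun lw a => PySem.List.pySetD lw (a + 1) 1) (List.replicate 11 (0 : Int))

def pvLower (A : List Int) : List Int :=
  (PySem.List.pyRange 1 11 1).foldl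
    (fun lw i => PySem.List.pySetD lw i (PySem.List.pyGetD lw (i - 1) 0 + PySem.List.pyGetD lw i 0))
    (pvLower1 A)

theorem getD_set_eq' (l : List Int) (n : Nat) (v : Int) (h : n < l.length) :
    (l.set n v).getD n 0 = v := by
  simp [List.getD_eq_getElem?_getD, h]

theorem getD_set_ne' (l : List Int) (n m : Nat) (v : Int) (h : m ≠ n) :
    (l.set n v).getD m 0 = l.getD m 0 := by
  simp [List.getD_eq_getElem?_getD, Ne.symm h]

theorem set_phase_spec (A : List Int) (hA : ∀ a ∈ A, -1 ≤ a ∧ a ≤ 9) :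
    ∀ acc : List Int, acc.length = 11 →
      (A.foldl (fun lw a => PySem.List.pySetD lw (a + 1) 1) acc).length = 11 ∧
      ∀ j : Nat, j < 11 →
        (A.foldl (fun lw a => PySem.List.pySetD lw (a + 1) 1) acc).getD j 0
          = if ((j : Int) - 1) ∈ A then 1 else acc.getD j 0 := by
  induction A with
  | nil => intro acc hlen; simp [hlen]
  | cons a A ih =>
    intro acc hlen
    obtain ⟨ha0, ha9⟩ := hA a (List.mem_cons_self ..)
    have hA' : ∀ x ∈ A, -1 ≤ x ∧ x ≤ 9 := fun x hx => hA x (List.mem_cons_of_mem _ hx)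
    have hset : PySem.List.pySetD acc (a + 1) 1 = acc.set (a + 1).toNat 1 :=
      PySem.List.pySetD_of_nonneg acc 1 (by omega)
    have hlen' : (acc.set (a + 1).toNat 1).length = 11 := by simp [hlen]
    obtain ⟨hL, hG⟩ := ih hA' (acc.set (a + 1).toNat 1) hlen'
    refine ⟨?_, ?_⟩
    · simpa [hset] using hL
    · intro j hj
      rw [List.foldl_cons, hset, hG j hj]
      by_cases hmem : ((j : Int) - 1) ∈ A
      · simp [hmem, List.mem_cons]
      · by_cases hja : (j : Int) - 1 = a
        · have hcond : (j : Int) - 1 ∈ a :: A := List.mem_cons.2 (Or.inl hja)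
          have hjeq : j = (a + 1).toNat := by omega
          rw [if_pos hcond, hjeq, getD_set_eq' _ _ _ (by omega)]
          simp
        · rw [getD_set_ne' _ _ _ _ (by omega)]
          simp only [List.mem_cons]
          have : ¬((j : Int) - 1 = a ∨ (j : Int) - 1 ∈ A) := by tauto
          simp [hmem, hja]

theorem pvLower1_spec (A : List Int) (hA : ∀ a ∈ A, -1 ≤ a ∧ a ≤ 9) :
    (pvLower1 A).length = 11 ∧
      ∀ j : Nat, j < 11 → (pvLower1 A).getD j 0 = if ((j : Int) - 1) ∈ A then 1 else 0 := by
  obtain ⟨hL, hG⟩ := set_phase_spec A hA (List.replicate 11 (0 : Int)) (by simp)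
  refine ⟨hL, fun j hj => ?_⟩
  rw [pvLower1, hG j hj]
  split
  · rfl
  · show (List.replicate 11 (0 : Int)).getD j 0 = 0
    interval_cases j <;> rfl

theorem prefix_phase_spec (A : List Int) (hA : ∀ a ∈ A, -1 ≤ a ∧ a ≤ 9) :
    ∀ k : Nat, k ≤ 10 →
      (let r := (PySem.List.pyRange 1 ((k : Int) + 1) 1).foldl
        (fun lw i => PySem.List.pySetD lw i
          (PySem.List.pyGetD lw (i - 1) 0 + PySem.List.pyGetD lw i 0)) (pvLower1 A)
      r.length = 11 ∧ (∀ i : Nat, i ≤ k → r.getD i 0 = pvCnt A i) ∧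
        (∀ i : Nat, k < i → i < 11 → r.getD i 0 = (pvLower1 A).getD i 0)) := by
  obtain ⟨hL1, hG1⟩ := pvLower1_spec A hA
  intro k
  induction k with
  | zero =>
    intro _
    rw [PySem.List.pyRange_one_eq_nil (by omega)]
    simp only [List.foldl_nil]
    refine ⟨hL1, fun i hi => ?_, fun i _ _ => by trivial⟩
    interval_cases i
    rw [hG1 0 (by omega)]
    by_cases hm : ((-1 : Int)) ∈ A <;> simp [pvCnt, hm]
  | succ k ih =>
    intro hk
    obtain ⟨hL, hGle, hGgt⟩ := ih (by omega)
    have hsplit : PySem.List.pyRange 1 ((k : Int) + 1 + 1) 1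
        = PySem.List.pyRange 1 ((k : Int) + 1) 1 ++ [(k : Int) + 1] :=
      PySem.List.pyRange_one_succ_right (by omega)
    push_cast
    rw [hsplit, List.foldl_append]
    set r := (PySem.List.pyRange 1 ((k : Int) + 1) 1).foldl
        (fun lw i => PySem.List.pySetD lw i
          (PySem.List.pyGetD lw (i - 1) 0 + PySem.List.pyGetD lw i 0)) (pvLower1 A) with hr
    simp only [List.foldl_cons, List.foldl_nil]
    have hsub : ((k : Int) + 1 - 1) = (k : Int) := by omega
    have hget1 : PySem.List.pyGetD r ((k : Int) + 1 - 1) 0 = pvCnt A k := by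
      rw [hsub, PySem.List.pyGetD_of_nonneg r 0 (by omega)]
      simpa using hGle k (by omega)
    have hget2 : PySem.List.pyGetD r ((k : Int) + 1) 0
        = (if ((k : Int)) ∈ A then 1 else 0) := by
      rw [PySem.List.pyGetD_of_nonneg r 0 (by omega)]
      have h1 : ((k : Int) + 1).toNat = k + 1 := by omega
      rw [h1, hGgt (k + 1) (by omega) (by omega), hG1 (k + 1) (by omega)]
      norm_num
    have hsetd : PySem.List.pySetD r ((k : Int) + 1)
          (PySem.List.pyGetD r ((k : Int) + 1 - 1) 0 + PySem.List.pyGetD r ((k : Int) + 1) 0)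
        = r.set (k + 1) (pvCnt A (k + 1)) := by
      rw [hget1, hget2, PySem.List.pySetD_of_nonneg r _ (by omega)]
      have h1 : ((k : Int) + 1).toNat = k + 1 := by omega
      rw [h1, pvCnt_succ]
    rw [hsetd]
    refine ⟨by simp [hL], fun i hi => ?_, fun i hi1 hi2 => ?_⟩
    · by_cases hik : i = k + 1
      · subst hik; rw [getD_set_eq' _ _ _ (by omega)]
      · rw [getD_set_ne' _ _ _ _ hik]
        exact hGle i (by omega)
    · rw [getD_set_ne' _ _ _ _ (by omega)]
      exact hGgt i (by omega) hi2

theorem pvLower_spec (A : List Int) (hA : ∀ a ∈ A, -1 ≤ a ∧ a ≤ 9) :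
    ∀ c : Int, 0 ≤ c → c ≤ 10 → PySem.List.pyGetD (pvLower A) c 0 = pvCnt A c.toNat := by
  intro c h0 h10
  obtain ⟨hL, hGle, _⟩ := prefix_phase_spec A hA 10 (by omega)
  rw [PySem.List.pyGetD_of_nonneg _ 0 h0]
  unfold pvLower
  have h11 : ((10 : Nat) : Int) + 1 = 11 := by norm_num
  rw [show (11 : Int) = ((10 : Nat) : Int) + 1 by norm_num]
  exact hGle c.toNat (by omega)

theorem pvLower_flag (A : List Int) (hA : ∀ a ∈ A, -1 ≤ a ∧ a ≤ 9) (c : Int)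
    (h0 : 0 ≤ c) (h9 : c ≤ 9) :
    (PySem.List.pyGetD (pvLower A) (c + 1) 0 == PySem.List.pyGetD (pvLower A) c 0 + 1)
      = decide (c ∈ A) := by
  rw [pvLower_spec A hA c h0 (by omega), pvLower_spec A hA (c + 1) (by omega) (by omega)]
  have h1 : (c + 1).toNat = c.toNat + 1 := by omega
  rw [h1, pvCnt_succ]
  have h2 : ((c.toNat : Int)) = c := by omega
  rw [h2]
  by_cases hm : c ∈ A <;> simp [hm]

-- ---- altBelow equals pvCnt ----
theorem contains_ofList_eq (A : List Int) (x : Int) :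
    PySem.Set.contains (PySem.Set.ofList A) x = A.contains x := by
  rw [Bool.eq_iff_iff]
  rw [PySem.Set.contains_iff, PySem.Set.mem_ofList, List.contains_iff_mem]

theorem altBelow_eq (A : List Int) (hA : ∀ a ∈ A, -1 ≤ a ∧ a ≤ 9) (c : Int)
    (h0 : 0 ≤ c) (h10 : c ≤ 10) :
    altBelow (PySem.Set.ofList A) c = pvCnt A c.toNat := by
  unfold altBelow pvCnt
  have hL1 : ((PySem.Set.ofList A).filter (fun x => decide (x < c))).Nodup :=
    (PySem.Set.nodup_ofList A).filter _
  have hL2 : (((List.range (c.toNat + 1)).filter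
      (fun j : Nat => decide (((j : Int) - 1) ∈ A))).map (fun j : Nat => (j : Int) - 1)).Nodup := by
    refine List.Nodup.map ?_ ((List.nodup_range).filter _)
    intro x y hxy
    simp only at hxy
    omega
  have hmemiff : ∀ x : Int,
      x ∈ (PySem.Set.ofList A).filter (fun x => decide (x < c)) ↔
      x ∈ ((List.range (c.toNat + 1)).filter
        (fun j : Nat => decide (((j : Int) - 1) ∈ A))).map (fun j : Nat => (j : Int) - 1) := by
    intro x
    simp only [List.mem_filter, List.mem_map, PySem.Set.mem_ofList, List.mem_range,
      decide_eq_true_eq]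
    constructor
    · rintro ⟨hxA, hxc⟩
      obtain ⟨hx1, _⟩ := hA x hxA
      refine ⟨(x + 1).toNat, ⟨by omega, by rw [show (((x + 1).toNat : Int)) = x + 1 by omega]; simpa⟩,
        by omega⟩
    · rintro ⟨j, ⟨hj, hjA⟩, hjx⟩
      subst hjx
      exact ⟨hjA, by omega⟩
  have hperm : ((PySem.Set.ofList A).filter (fun x => decide (x < c))).toFinset
      = (((List.range (c.toNat + 1)).filter
        (fun j : Nat => decide (((j : Int) - 1) ∈ A))).map (fun j : Nat => (j : Int) - 1)).toFinset := by
    apply Finset.ext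
    intro x
    simp only [List.mem_toFinset]
    exact hmemiff x
  have h1 := List.toFinset_card_of_nodup hL1
  have h2 := List.toFinset_card_of_nodup hL2
  rw [hperm, h2, List.length_map] at h1
  rw [h1]

-- ---- the abstract recurrence shared by both loops ----
def pvT (A D : List Int) : Nat → Bool
  | 0 => true
  | i + 1 => pvT A D i && decide (D.getD i 0 ∈ A)

def pvDval (A D : List Int) (lead : Int) (i : Nat) : Int :=
  pvCnt A (D.getD i 0).toNat - (if i = 0 then lead else 0)

def pvF (A D : List Int) (L lead : Int) : Nat → Int
  | 0 => 0
  | i + 1 => pvF A D L lead i * L + (if pvT A D i then pvDval A D lead i else 0)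

-- B's recursion computes the same total
theorem altCount_bridge (A D : List Int) (L lead : Int) (hA : ∀ a ∈ A, -1 ≤ a ∧ a ≤ 9)
    (hD : ∀ d ∈ D, 0 ≤ d ∧ d < 10) :
    ∀ k i : Nat, i + k = D.length →
      pvF A D L lead D.length
        = pvF A D L lead i * L ^ k
          + (if pvT A D i then altCount D (PySem.Set.ofList A) L lead D.length i else 0) := by
  intro k
  induction k with
  | zero =>
    intro i h
    have hi : i = D.length := by omega
    subst hi
    rw [altCount.eq_def]
    simp
  | succ k ih =>
    intro i h
    have hi : i < D.length := by omega
    have hIH := ih (i + 1) (by omega)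
    have hmemD : D.getD i 0 ∈ D := by
      rw [List.getD_eq_getElem D 0 hi]; exact List.getElem_mem hi
    obtain ⟨hd0, hd10⟩ := hD _ hmemD
    rw [altCount.eq_def]
    simp only [if_neg (by omega : ¬ D.length ≤ i)]
    rw [altBelow_eq A hA _ hd0 (by omega), contains_ofList_eq, List.contains_eq_mem]
    have hk : D.length - 1 - i = k := by omega
    rw [hk]
    cases hT : pvT A D i with
    | false =>
      have hT1 : pvT A D (i + 1) = false := by simp [pvT, hT]
      rw [hT1, if_neg (by simp)] at hIH
      have hF1 : pvF A D L lead (i + 1) = pvF A D L lead i * L := by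
        simp [pvF, hT]
      rw [hIH, hF1, if_neg (by simp)]
      ring
    | true =>
      have hT1 : pvT A D (i + 1) = decide (D.getD i 0 ∈ A) := by simp [pvT, hT]
      rw [hT1] at hIH
      have hF1 : pvF A D L lead (i + 1) = pvF A D L lead i * L + pvDval A D lead i := by
        simp [pvF, hT]
      rw [hIH, hF1, if_pos rfl]
      have hbel : (if i = 0 then pvCnt A (D.getD i 0).toNat - lead else pvCnt A (D.getD i 0).toNat)
          = pvDval A D lead i := by
        unfold pvDval
        split <;> simp_all
      rw [hbel]
      ring

-- A's dp loop computes pvF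
theorem dp_loop_spec (A D : List Int) (hA : ∀ a ∈ A, -1 ≤ a ∧ a ≤ 9)
    (hD : ∀ d ∈ D, 0 ≤ d ∧ d < 10) (B : Int) (hB : B = (D.length : Int)) :
    ∀ k : Nat, k ≤ D.length →
      (let st := (PySem.List.pyRange 1 ((k : Int) + 1) 1).foldl
        (fun (st : List Int × Bool) i =>
          let dp := st.1
          let flag := st.2
          let d := PySem.List.pyGetD (pvLower A) (PySem.List.pyGetD D (i - 1) 0) 0
          let dp := PySem.List.pySetD dp i (PySem.List.pyGetD dp (i - 1) 0 * (A.length : Int))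
          let d := if i == 1 && A.contains 0 && B != 1 then d - 1 else d
          let dp := if flag then PySem.List.pySetD dp i (PySem.List.pyGetD dp i 0 + d) else dp
          let flag := flag &&
            (PySem.List.pyGetD (pvLower A) (PySem.List.pyGetD D (i - 1) 0 + 1) 0
              == PySem.List.pyGetD (pvLower A) (PySem.List.pyGetD D (i - 1) 0) 0 + 1)
          (dp, flag))
        (PySem.List.pySetD (List.replicate (B + 1).toNat (0 : Int)) 0 0, true)
      st.1.length = D.length + 1
        ∧ st.1.getD k 0 = pvF A D (A.length : Int)
            (if A.contains 0 && B != 1 then 1 else 0) k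
        ∧ st.2 = pvT A D k) := by
  have hlead : ∀ dd : Int, (if A.contains 0 && B != 1 then dd - 1 else dd)
      = dd - (if A.contains 0 && B != 1 then 1 else 0) := by
    intro dd; split <;> ring
  intro k
  induction k with
  | zero =>
    intro _
    dsimp only
    rw [show ((0 : Nat) : Int) + 1 = 1 by norm_num, PySem.List.pyRange_one_eq_nil (by omega),
      List.foldl_nil]
    have hbase : PySem.List.pySetD (List.replicate (B + 1).toNat (0 : Int)) 0 0
        = (List.replicate (B + 1).toNat (0 : Int)).set 0 0 :=
      PySem.List.pySetD_of_nonneg _ _ (by omega)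
    have hlen : (B + 1).toNat = D.length + 1 := by omega
    refine ⟨by simp [hlen], ?_, rfl⟩
    dsimp only
    rw [hbase]
    rw [getD_set_eq' _ _ _ (by simp [hlen])]
    rfl
  | succ k ih =>
    intro hk
    have ihh := ih (by omega)
    dsimp only at ihh ⊢
    have hsplit : PySem.List.pyRange 1 ((k : Int) + 1 + 1) 1
        = PySem.List.pyRange 1 ((k : Int) + 1) 1 ++ [(k : Int) + 1] :=
      PySem.List.pyRange_one_succ_right (by omega)
    push_cast
    rw [hsplit, List.foldl_append, List.foldl_cons, List.foldl_nil]
    rcases hstEq : (PySem.List.pyRange 1 ((k : Int) + 1) 1).foldl _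
        (PySem.List.pySetD (List.replicate (B + 1).toNat (0 : Int)) 0 0, true) with ⟨dp, flag⟩
    rw [hstEq] at ihh
    dsimp only at ihh
    obtain ⟨hdplen, hdpk, hflag⟩ := ihh
    subst hflag
    have hkD : k < D.length := by omega
    have hmemD : D.getD k 0 ∈ D := by
      rw [List.getD_eq_getElem D 0 hkD]; exact List.getElem_mem hkD
    obtain ⟨hd0, hd10⟩ := hD _ hmemD
    dsimp only
    have hsub : (k : Int) + 1 - 1 = (k : Int) := by ring
    have hgetDig : PySem.List.pyGetD D ((k : Int) + 1 - 1) 0 = D.getD k 0 := by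
      rw [hsub, PySem.List.pyGetD_of_nonneg D 0 (by omega)]
      norm_num
    rw [hgetDig]
    have hlow : PySem.List.pyGetD (pvLower A) (D.getD k 0) 0 = pvCnt A (D.getD k 0).toNat :=
      pvLower_spec A hA _ hd0 (by omega)
    have hgetPrev : PySem.List.pyGetD dp ((k : Int) + 1 - 1) 0 = pvF A D (↑A.length)
        (if A.contains 0 && B != 1 then 1 else 0) k := by
      rw [hsub, PySem.List.pyGetD_of_nonneg dp 0 (by omega)]
      simpa using hdpk
    rw [hlow, hgetPrev]
    set L : Int := (A.length : Int) with hLdef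
    set lead : Int := (if A.contains 0 && B != 1 then (1 : Int) else 0) with hleaddef
    have hset1 : PySem.List.pySetD dp ((k : Int) + 1) (pvF A D L lead k * L)
        = dp.set (k + 1) (pvF A D L lead k * L) := by
      rw [PySem.List.pySetD_of_nonneg dp _ (by omega)]
      norm_num
    rw [hset1]
    set dp1 := dp.set (k + 1) (pvF A D L lead k * L) with hdp1
    have hdp1len : dp1.length = D.length + 1 := by simp [hdp1, hdplen]
    have hget1 : PySem.List.pyGetD dp1 ((k : Int) + 1) 0 = pvF A D L lead k * L := by
      rw [PySem.List.pyGetD_of_nonneg dp1 0 (by omega)]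
      rw [show ((k : Int) + 1).toNat = k + 1 by omega]
      exact getD_set_eq' _ _ _ (by omega)
    have hflagnew : ((PySem.List.pyGetD (pvLower A) (D.getD k 0 + 1) 0
          == pvCnt A (D.getD k 0).toNat + 1))
        = decide (D.getD k 0 ∈ A) := by
      rw [← hlow]; exact pvLower_flag A hA _ hd0 (by omega)
    have hbeq : (((k : Int) + 1) == 1) = decide (k = 0) := by
      rcases Nat.eq_zero_or_pos k with h | h
      · subst h; norm_num
      · have h1 : ¬((k : Int) + 1 = 1) := by omega
        have h2 : ¬(k = 0) := by omega
        simp [h1, h2]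
    rw [hbeq, hflagnew]
    have hdval : (if decide (k = 0) && A.contains 0 && B != 1
          then pvCnt A (D.getD k 0).toNat - 1 else pvCnt A (D.getD k 0).toNat)
        = pvDval A D lead k := by
      unfold pvDval
      rcases Nat.eq_zero_or_pos k with h | h
      · subst h
        simp only [decide_true, Bool.true_and]
        exact hlead _
      · have h2 : ¬(k = 0) := by omega
        simp [h2]
    rw [hdval]
    refine ⟨?_, ?_, ?_⟩
    · cases hT : pvT A D k <;>
        simp [hdp1len, PySem.List.pySetD_of_nonneg dp1 _ (by omega : (0:Int) ≤ (k:Int)+1)]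
    · cases hT : pvT A D k with
      | true =>
        rw [hget1]
        have hset2 : PySem.List.pySetD dp1 ((k : Int) + 1) (pvF A D L lead k * L + pvDval A D lead k)
            = dp1.set (k + 1) (pvF A D L lead k * L + pvDval A D lead k) := by
          rw [PySem.List.pySetD_of_nonneg dp1 _ (by omega)]
          norm_num
        rw [hset2, if_pos rfl]
        rw [getD_set_eq' _ _ _ (by omega)]
        simp [pvF, hT]
      | false =>
        simp only [Bool.false_eq_true, if_false]
        rw [hdp1]
        rw [getD_set_eq' _ _ _ (by omega)]
        simp [pvF, hT]
    · cases hT : pvT A D k with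
      | true => simp [pvT, hT]
      | false => simp [pvT, hT]

theorem loop_append (n : Nat) : ∀ N : Int, N.natAbs ≤ n → ∀ acc : List Int,
    numToVecLoop N acc = acc ++ numToVecLoop N [] := by
  induction n with
  | zero =>
    intro N hN acc
    have h0 : N = 0 := by omega
    subst h0
    have h : ∀ acc' : List Int, numToVecLoop 0 acc' = acc' := by
      intro acc'; rw [numToVecLoop.eq_def]; simp
    rw [h, h]
    simp
  | succ n ih =>
    intro N hN acc
    rw [numToVecLoop.eq_def]
    conv_rhs => rw [numToVecLoop.eq_def]
    by_cases h0 : N = 0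
    · simp [h0]
    · by_cases hneg : N < 0
      · simp [h0, hneg]
      · simp only [if_neg h0, if_neg hneg]
        have hdec : (PySem.Int.floordiv N 10).natAbs ≤ n := by
          rw [PySem.Int.floordiv_eq_ediv_of_pos (by omega)]
          omega
        rw [ih _ hdec (acc ++ [PySem.Int.mod N 10]), ih _ hdec ([] ++ [PySem.Int.mod N 10])]
        simp

theorem loop_pos_bounds (n : Nat) : ∀ N : Int, N.natAbs ≤ n → 0 < N →
    (10 : Int) ^ ((numToVecLoop N []).length - 1) ≤ N ∧
      N < (10 : Int) ^ (numToVecLoop N []).length := by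
  induction n with
  | zero => intro N hN hpos; omega
  | succ n ih =>
    intro N hN hpos
    have hq : PySem.Int.floordiv N 10 = N / 10 := PySem.Int.floordiv_eq_ediv_of_pos (by omega)
    have hr : PySem.Int.mod N 10 = N % 10 := PySem.Int.mod_eq_emod_of_pos (by omega)
    have hsplit : numToVecLoop N [] = [PySem.Int.mod N 10] ++ numToVecLoop (PySem.Int.floordiv N 10) [] := by
      rw [numToVecLoop.eq_def]
      simp only [if_neg (by omega : ¬N = 0), if_neg (by omega : ¬N < 0), List.nil_append]
      have hdec : (PySem.Int.floordiv N 10).natAbs ≤ n := by rw [hq]; omega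
      exact loop_append n _ hdec _
    by_cases hq0 : N / 10 = 0
    · have : numToVecLoop (PySem.Int.floordiv N 10) [] = [] := by
        rw [hq, hq0, numToVecLoop.eq_def]; simp
      rw [hsplit, this]
      simp only [List.append_nil, List.length_singleton]
      norm_num
      omega
    · have hqpos : 0 < N / 10 := by
        rcases lt_trichotomy (N / 10) 0 with h | h | h
        · exfalso; omega
        · exact absurd h hq0
        · exact h
      have hdec : (PySem.Int.floordiv N 10).natAbs ≤ n := by rw [hq]; omega
      obtain ⟨hlo, hhi⟩ := ih _ hdec (by rw [hq]; exact hqpos)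
      set k := (numToVecLoop (PySem.Int.floordiv N 10) []).length with hk
      have hlo' : (10 : Int) ^ (k - 1) ≤ N / 10 := by rw [← hq]; exact hlo
      have hhi' : N / 10 < (10 : Int) ^ k := by rw [← hq]; exact hhi
      have hlen1 : 1 ≤ k := by
        by_contra h
        have h0 : k = 0 := by omega
        rw [h0] at hhi'
        simp at hhi'
        omega
      rw [hsplit]
      simp only [List.length_append, List.length_singleton]
      have hku : 1 + k - 1 = k := by omega
      have hks : k - 1 + 1 = k := by omega
      constructor
      · rw [hku]
        calc (10 : Int) ^ k = 10 ^ (k - 1 + 1) := by rw [hks]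
          _ = 10 ^ (k - 1) * 10 := by rw [pow_succ]
          _ ≤ (N / 10) * 10 := by nlinarith [pow_pos (by norm_num : (0:Int) < 10) (k - 1)]
          _ ≤ N := by omega
      · have h1k : 1 + k = k + 1 := by omega
        rw [h1k, pow_succ]
        have : N < (N / 10) * 10 + 10 := by omega
        nlinarith [pow_pos (by norm_num : (0:Int) < 10) k]

theorem numToVec_len_arith (C B : Int) (hC : 0 ≤ C) (hB : B = ((numToVec C).length : Int)) :
    (C = 0 ∧ B = 1) ∨
      (0 < C ∧ 1 ≤ B ∧ 10 ^ (B - 1).toNat ≤ C ∧ C < 10 ^ B.toNat) := by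
  by_cases h0 : C = 0
  · subst h0
    left
    refine ⟨rfl, ?_⟩
    rw [hB]
    have hz : numToVec 0 = [0] := by
      unfold numToVec
      rw [numToVecLoop.eq_def]
      simp
    rw [hz]
    rfl
  · right
    have hpos : 0 < C := by omega
    have hne : numToVecLoop C [] ≠ [] := by
      rw [numToVecLoop.eq_def]
      simp only [if_neg h0, if_neg (by omega : ¬C < 0)]
      rw [loop_append (PySem.Int.floordiv C 10).natAbs _ (le_refl _)]
      simp
    have hlen : (numToVec C).length = (numToVecLoop C []).length := by
      unfold numToVec
      simp only [List.length_reverse]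
      rw [if_neg (by simpa [List.length_eq_zero_iff] using hne)]
    obtain ⟨hlo, hhi⟩ := loop_pos_bounds C.natAbs C (le_refl _) hpos
    have hlen1 : 1 ≤ (numToVecLoop C []).length := by
      by_contra h
      have he : numToVecLoop C [] = [] := by
        cases hx : numToVecLoop C [] with
        | nil => rfl
        | cons a l => rw [hx] at h; simp at h
      exact hne he
    refine ⟨hpos, by omega, ?_, ?_⟩
    · have h1 : (B - 1).toNat = (numToVecLoop C []).length - 1 := by omega
      rw [h1]; exact hlo
    · have h2 : B.toNat = (numToVecLoop C []).length := by omega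
      rw [h2]; exact hhi

theorem solution_spec : Claim_equal_solution := by
  intro A B C _ hPre
  obtain ⟨hBor, hC0, hAor⟩ := hPre
  unfold Spec_solution
  unfold solution solution_alt
  rw [altDigits_eq]
  have hDmem := numToVec_mem C
  have hDne := numToVec_ne_nil C
  set D := numToVec C with hDdef
  have hDlen : 1 ≤ D.length := List.length_pos_iff.2 hDne
  dsimp only
  rw [contains_ofList_eq]
  by_cases h1 : (B > (D.length : Int) || ((A.length : Int) == 0)) = true
  · rw [if_pos h1, if_pos h1]
  · rw [if_neg h1, if_neg h1]
    by_cases h2 : (B < (D.length : Int))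
    · rw [if_pos h2, if_pos h2]
      cases hc : (A.contains 0 && B != 1) with
      | true => simp
      | false => simp
    · rw [if_neg h2, if_neg h2]
      have hBlen : B = (D.length : Int) := by
        simp only [Bool.or_eq_true, decide_eq_true_eq, not_or] at h1
        omega
      have harith := numToVec_len_arith C B hC0 hBlen
      have hA' : ∀ a ∈ A, -1 ≤ a ∧ a ≤ 9 := by
        rcases hAor with h | h
        · exact h
        · exact absurd harith h
      -- identify the let-bound lower table with pvLower
      have hlow1 : A.foldl (fun lw a => PySem.List.pySetD lw (a + 1) 1)
          (List.replicate 11 (0 : Int)) = pvLower1 A := rfl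
      have hlow2 : (PySem.List.pyRange 1 11 1).foldl
          (fun lw i => PySem.List.pySetD lw i
            (PySem.List.pyGetD lw (i - 1) 0 + PySem.List.pyGetD lw i 0)) (pvLower1 A)
          = pvLower A := rfl
      rw [hlow1, hlow2]
      have hspec := dp_loop_spec A D hA' hDmem B hBlen D.length (le_refl _)
      rw [← hBlen] at hspec
      dsimp only at hspec
      obtain ⟨hlen, hget, _⟩ := hspec
      rw [PySem.List.pyGetD_of_nonneg _ 0 (by omega)]
      have htn2 : B.toNat = D.length := by omega
      rw [htn2]
      rw [hget]
      have hbr := altCount_bridge A D (A.length : Int)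
        (if A.contains 0 && B != 1 then 1 else 0) hA' hDmem D.length 0 (by omega)
      rw [hbr]
      simp [pvF, pvT]
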